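-- pv_equiv track=rewrite | github.com/jinmoon23/TIL | 2407_algorithm_course/240730_day_2/flatten/test.py | solution
-- ===== SOURCE A (Python) =====
-- def solution(tc,work_list,work_count):
--     max_value = max(work_list) # 9 /
--     min_value = min(work_list) # 1 /
--     while work_count != 0 and max_value - min_value  > 1:
--         max_value_index = work_list.index(max_value) # 3
--         min_value_index = work_list.index(min_value) # 0
--
--         work_list[max_value_index] -= 1 # [1,2,3,8]이 됨
--         max_value = max(work_list) # 9에 8이 재할당됨
--         max_value_index = work_list.index(max_value) # 3
--         work_list[min_value_index] += 1 # [2,2,3,8]이 됨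
--         min_value = min(work_list)
--         min_value_index = work_list.index(min_value) # 0
--
--         work_count -= 1 # 3이 됨
--     result = max_value - min_value
--     return f'#{tc} {result}'
-- ===== SOURCE B (Python) =====
-- def solution(tc, work_list, work_count):
--     # Histogram simulation: keep a value->count dict and the current max/min,
--     # so each transfer is O(1) instead of rescanning the list for max/min/index.
--     counts = {}
--     for a in work_list:
--         counts[a] = counts.get(a, 0) + 1
--     hi = max(work_list)
--     lo = min(work_list)
--     while work_count != 0 and hi - lo > 1:
--         counts[hi] = counts[hi] - 1
--         if counts[hi] == 0:
--             del counts[hi]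
--         counts[hi - 1] = counts.get(hi - 1, 0) + 1
--         counts[lo] = counts[lo] - 1
--         if counts[lo] == 0:
--             del counts[lo]
--         counts[lo + 1] = counts.get(lo + 1, 0) + 1
--         if hi not in counts:
--             hi = hi - 1
--         if lo not in counts:
--             lo = lo + 1
--         work_count -= 1
--     return f'#{tc} {hi - lo}'
-- ===== Notes on version B (the rewrite author's own statement) =====
-- stated objective: faster
-- what changed: B replaces A's per-iteration O(n) rescans of the list (max(), min(), .index(), in-place element updates) by a value->count dictionary built once, with the current max and min maintained incrementally in O(1) per moved unit; B also does not mutate work_list.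
import Mathlib
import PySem

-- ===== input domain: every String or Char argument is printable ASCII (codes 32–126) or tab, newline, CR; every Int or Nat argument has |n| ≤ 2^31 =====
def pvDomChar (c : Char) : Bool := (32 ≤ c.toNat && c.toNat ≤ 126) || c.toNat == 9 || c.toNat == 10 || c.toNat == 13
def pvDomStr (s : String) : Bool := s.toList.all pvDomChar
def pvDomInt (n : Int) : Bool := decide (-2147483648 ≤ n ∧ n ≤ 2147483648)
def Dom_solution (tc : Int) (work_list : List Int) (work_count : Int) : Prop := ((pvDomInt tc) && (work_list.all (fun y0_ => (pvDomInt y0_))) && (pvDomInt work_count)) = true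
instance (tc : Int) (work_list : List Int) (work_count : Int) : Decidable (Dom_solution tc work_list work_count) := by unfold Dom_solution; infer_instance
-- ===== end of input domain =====

-- B replaces A's per-step rescans of the list (max, min, index, in-place set) by a
-- value→count dictionary with the current max/min maintained incrementally (objective:
-- faster, constant-factor: O(1) work per moved unit instead of O(n)).
-- NOTE: Python A mutates work_list in place; B does not. The equivalence proved here is
-- about the RETURN value only.

-- ===== PORT A =====
-- fuel bound for the loop port (the Python loop terminates; fuel is scaffolding,
-- large enough that the port never exhausts it)
def pvFuelA (l : List Int) : Nat := 4 * ((l.map Int.natAbs).sum + 1) * (l.length + 1)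

-- literal port of A's while loop; the two dead `work_list.index(...)` recomputations in
-- the body (values never used, never raising since the value searched for is present)
-- are not carried in the state
def solutionLoopA : Nat → List Int → Int → Int → Int → Int
  | 0, _, _, maxv, minv => maxv - minv
  | Nat.succ fuel, l, wc, maxv, minv =>
    if wc ≠ 0 ∧ maxv - minv > 1 then
      let maxIdx := (PySem.List.index? l maxv).getD 0
      let minIdx := (PySem.List.index? l minv).getD 0
      let l1 := l.set maxIdx (maxv - 1)
      let maxv' := (PySem.List.max? l1 (fun y => y)).getD 0
      let l2 := l1.set minIdx (minv + 1)
      let minv' := (PySem.List.min? l2 (fun y => y)).getD 0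
      solutionLoopA fuel l2 (wc - 1) maxv' minv'
    else maxv - minv

def solution (tc : Int) (work_list : List Int) (work_count : Int) : String :=
  match PySem.List.max? work_list (fun y => y), PySem.List.min? work_list (fun y => y) with
  | some maxv, some minv =>
    "#" ++ PySem.Int.toStr tc ++ " " ++
      PySem.Int.toStr (solutionLoopA (pvFuelA work_list) work_list work_count maxv minv)
  | _, _ => ""   -- max([]) raises ValueError in Python; excluded by Pre_solution

-- ===== PORT B =====
-- fuel bound for Source B's loop port (same scaffolding role as pvFuelA)
def pvFuelB (l : List Int) : Nat := 4 * ((l.map Int.natAbs).sum + 1) * (l.length + 1)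

-- literal port of Source B's while loop over the counts dictionary
-- (counts[hi] -= 1 is a get-then-set on a key Source B itself always keeps present,
-- ported as insert of getD - 1)
def solutionLoopB : Nat → PySem.Dict Int Int → Int → Int → Int → Int
  | 0, _, _, hi, lo => hi - lo
  | Nat.succ fuel, c, wc, hi, lo =>
    if wc ≠ 0 ∧ hi - lo > 1 then
      let c1 := c.insert hi (c.getD hi 0 - 1)
      let c2 := if c1.getD hi 0 == 0 then c1.erase hi else c1
      let c3 := c2.insert (hi - 1) (c2.getD (hi - 1) 0 + 1)
      let c4 := c3.insert lo (c3.getD lo 0 - 1)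
      let c5 := if c4.getD lo 0 == 0 then c4.erase lo else c4
      let c6 := c5.insert (lo + 1) (c5.getD (lo + 1) 0 + 1)
      let hi' := if c6.contains hi then hi else hi - 1
      let lo' := if c6.contains lo then lo else lo + 1
      solutionLoopB fuel c6 (wc - 1) hi' lo'
    else hi - lo

def solution_alt (tc : Int) (work_list : List Int) (work_count : Int) : String :=
  let counts := work_list.foldl (fun d a => d.insert a (d.getD a 0 + 1)) PySem.Dict.empty
  match PySem.List.max? work_list (fun y => y) with
  | none => ""   -- max([]) raises ValueError in Source B too; excluded by Pre_solution
  | some hi =>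
    match PySem.List.min? work_list (fun y => y) with
    | none => ""
    | some lo =>
      "#" ++ PySem.Int.toStr tc ++ " " ++
        PySem.Int.toStr (solutionLoopB (pvFuelB work_list) counts work_count hi lo)

-- ===== PRECONDITION & SPEC =====
-- Python A (and Source B) raise ValueError on an empty work_list (max of empty sequence)
def Pre_solution (tc : Int) (work_list : List Int) (work_count : Int) : Prop := work_list ≠ []
instance (tc : Int) (work_list : List Int) (work_count : Int) : Decidable (Pre_solution tc work_list work_count) := by unfold Pre_solution; infer_instance
def pvWitness_solution : Int × List Int × Int := (1, [1, 5, 2], 3)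

def Spec_solution (tc : Int) (work_list : List Int) (work_count : Int) (out : String) : Prop := out = solution_alt tc work_list work_count
instance (tc : Int) (work_list : List Int) (work_count : Int) (out : String) : Decidable (Spec_solution tc work_list work_count out) := by unfold Spec_solution; infer_instance

-- ===== CLAIM (what is proved, stated in full; the proofs are below) =====
def Claim_equal_solution : Prop := ∀ (tc : Int) (work_list : List Int) (work_count : Int), Dom_solution tc work_list work_count → Pre_solution tc work_list work_count → Spec_solution tc work_list work_count (solution tc work_list work_count)

-- ===== LEMMAS AND PROOFS =====

-- the contents of Source B's counts dict, as a function of the list it mirrors: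
-- present with value (count) exactly for values occurring in the list
theorem pv_get?_insert (d : PySem.Dict Int Int) (k x v : Int) :
    (d.insert k v).get? x = if x = k then some v else d.get? x := by
  by_cases h : x = k
  · subst h; simp [PySem.Dict.get?_insert_self]
  · simp [h, PySem.Dict.get?_insert_of_ne d v h]

theorem pv_find?_filter_ne (t : List (Int × Int)) (k x : Int) (hxk : x ≠ k) :
    List.find? (fun p => p.1 == x) (t.filter (fun p => !(p.1 == k))) =
      List.find? (fun p => p.1 == x) t := by
  induction t with
  | nil => rfl
  | cons p t iht =>
    by_cases hpk : p.1 = k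
    · have hpx : (p.1 == x) = false := by
        simp only [beq_eq_false_iff_ne]; intro h; exact hxk (by rw [← h, hpk])
      have hkx : (k == x) = false := by simp only [beq_eq_false_iff_ne]; exact fun h => hxk h.symm
      simp [List.filter_cons, hpk, List.find?, hpx, iht, hkx]
    · simp only [List.filter_cons]
      by_cases hpx : p.1 = x
      · simp [hpk, List.find?, hpx, hxk]
      · simp [hpk, List.find?, (by simp [hpx] : (p.1 == x) = false), iht]

theorem pv_get?_erase (d : PySem.Dict Int Int) (k x : Int) :
    (d.erase k).get? x = if x = k then none else d.get? x := by
  obtain ⟨items⟩ := d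
  simp only [PySem.Dict.erase, PySem.Dict.get?]
  by_cases hxk : x = k
  · subst hxk
    rw [if_pos rfl]
    have hnone : List.find? (fun p => p.1 == x) (items.filter (fun p => !(p.1 == x))) = none := by
      rw [List.find?_eq_none]
      intro p hp
      have h2 := (List.mem_filter.mp hp).2
      simpa using h2
    simp [hnone]
  · rw [if_neg hxk, pv_find?_filter_ne items k x hxk]

-- pcount: abstract model of the counts dict
def pcount (l : List Int) (x : Int) : Option Int :=
  if 0 < l.count x then some (l.count x : Int) else none

theorem pv_get?_counter (l : List Int) (x : Int) :
    (PySem.Dict.counter l).get? x = pcount l x := by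
  have hco := PySem.Dict.contains_counter l x
  have hgd := PySem.Dict.getD_counter l x
  have hcs := PySem.Dict.contains_eq_isSome_get? (PySem.Dict.counter l) x
  rw [PySem.Dict.getD_eq_get?_getD] at hgd
  cases hg : (PySem.Dict.counter l).get? x with
  | none =>
    rw [hg] at hcs hgd
    rw [hcs] at hco
    have hx : x ∉ l := by
      intro hmem
      have : l.contains x = true := by simpa using hmem
      rw [this] at hco; simp at hco
    have : l.count x = 0 := List.count_eq_zero.mpr hx
    simp [pcount, this]
  | some v =>
    rw [hg] at hcs hgd
    rw [hcs] at hco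
    have hx : x ∈ l := by
      have : l.contains x = true := hco.symm
      simpa using this
    have hcnt : 0 < l.count x := List.count_pos_iff.mpr hx
    simp only [Option.getD_some] at hgd
    simp [pcount, hcnt, ← hgd]

theorem pv_count_set (l : List Int) : ∀ (i : Nat) (h : i < l.length) (v w : Int),
    (l.set i v).count w + (if l[i] = w then 1 else 0) = l.count w + (if v = w then 1 else 0) := by
  induction l with
  | nil => intro i h; simp at h
  | cons a t iht =>
    intro i h v w
    cases i with
    | zero =>
      simp only [List.set, List.count_cons, List.getElem_cons_zero]
      by_cases h1 : a = w <;> by_cases h2 : v = w <;> simp [h1, h2] <;> omega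
    | succ j =>
      have hjt : j < t.length := by simpa using h
      have ih := iht j hjt v w
      have hget : (a :: t)[j + 1]'h = t[j]'hjt := by simp
      simp only [List.set, List.count_cons, hget]
      omega

theorem pv_max?_id_eq (xs : List Int) (v : Int) (hv : v ∈ xs) (hb : ∀ x ∈ xs, x ≤ v) :
    PySem.List.max? xs (fun y => y) = some v := by
  cases h : PySem.List.max? xs (fun y => y) with
  | none =>
    rw [PySem.List.max?_eq_none_iff] at h; subst h; simp at hv
  | some m =>
    have hm := PySem.List.max?_mem h
    have hmax := PySem.List.max?_isMax h
    have : m = v := le_antisymm (hb m hm) (hmax v hv)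
    rw [this]

theorem pv_min?_id_eq (xs : List Int) (v : Int) (hv : v ∈ xs) (hb : ∀ x ∈ xs, v ≤ x) :
    PySem.List.min? xs (fun y => y) = some v := by
  cases h : PySem.List.min? xs (fun y => y) with
  | none =>
    rw [PySem.List.min?_eq_none_iff] at h; subst h; simp at hv
  | some m =>
    have hm := PySem.List.min?_mem h
    have hmin := PySem.List.min?_isMin h
    have : m = v := le_antisymm (hmin v hv) (hb m hm)
    rw [this]

theorem pcount_getD (l : List Int) (x : Int) : (pcount l x).getD 0 = (l.count x : Int) := by
  unfold pcount; split <;> simp <;> omega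

theorem pv_loop_eq (fuel : Nat) : ∀ (l : List Int) (c : PySem.Dict Int Int) (wc maxv minv : Int),
    (∀ x, c.get? x = pcount l x) →
    maxv ∈ l → (∀ x ∈ l, x ≤ maxv) → minv ∈ l → (∀ x ∈ l, minv ≤ x) →
    solutionLoopA fuel l wc maxv minv = solutionLoopB fuel c wc maxv minv := by
  induction fuel with
  | zero => intros; rfl
  | succ n ih =>
    intro l c wc maxv minv hc hMmem hMmax hmmem hmmin
    by_cases hcond : wc ≠ 0 ∧ maxv - minv > 1
    case neg => simp only [solutionLoopA, solutionLoopB, if_neg hcond]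
    case pos =>
    obtain ⟨hwc, hgap⟩ := hcond
    have hgap2 : minv + 2 ≤ maxv := by omega
    -- index facts
    obtain ⟨i, hi⟩ := Option.isSome_iff_exists.mp ((PySem.List.index?_isSome_iff l maxv).mpr hMmem)
    obtain ⟨hilen, hival, -⟩ := PySem.List.getElem_of_index?_eq_some hi
    obtain ⟨j, hj⟩ := Option.isSome_iff_exists.mp ((PySem.List.index?_isSome_iff l minv).mpr hmmem)
    obtain ⟨hjlen, hjval, -⟩ := PySem.List.getElem_of_index?_eq_some hj
    have hij : i ≠ j := by
      intro h; subst h; rw [hival] at hjval; omega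
    have hj1 : j < (l.set i (maxv - 1)).length := by simpa using hjlen
    have hjval1 : (l.set i (maxv - 1))[j] = minv := by
      rw [List.getElem_set_ne hij]; exact hjval
    -- count bookkeeping
    have eq1 : ∀ w : Int, (l.set i (maxv - 1)).count w + (if maxv = w then 1 else 0)
        = l.count w + (if maxv - 1 = w then 1 else 0) := by
      intro w; have h := pv_count_set l i hilen (maxv - 1) w; rw [hival] at h; exact h
    have eq2 : ∀ w : Int, ((l.set i (maxv - 1)).set j (minv + 1)).count w + (if minv = w then 1 else 0)
        = (l.set i (maxv - 1)).count w + (if minv + 1 = w then 1 else 0) := by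
      intro w; have h := pv_count_set (l.set i (maxv - 1)) j hj1 (minv + 1) w
      rw [hjval1] at h; exact h
    have hcM : 0 < l.count maxv := List.count_pos_iff.mpr hMmem
    have hcm : 0 < l.count minv := List.count_pos_iff.mpr hmmem
    have aM : (l.set i (maxv - 1)).count maxv + 1 = l.count maxv := by
      have h := eq1 maxv; rw [if_pos rfl, if_neg (by omega : ¬ (maxv - 1 = maxv))] at h; omega
    have aM1 : (l.set i (maxv - 1)).count (maxv - 1) = l.count (maxv - 1) + 1 := by
      have h := eq1 (maxv - 1); rw [if_neg (by omega : ¬ (maxv = maxv - 1)), if_pos rfl] at h; omega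
    have am : (l.set i (maxv - 1)).count minv = l.count minv := by
      have h := eq1 minv; rw [if_neg (by omega : ¬ (maxv = minv)), if_neg (by omega : ¬ (maxv - 1 = minv))] at h; omega
    have am1 : (l.set i (maxv - 1)).count (minv + 1)
        = l.count (minv + 1) + (if maxv - 1 = minv + 1 then 1 else 0) := by
      have h := eq1 (minv + 1); rw [if_neg (by omega : ¬ (maxv = minv + 1))] at h; omega
    have bm : ((l.set i (maxv - 1)).set j (minv + 1)).count minv + 1 = (l.set i (maxv - 1)).count minv := by
      have h := eq2 minv; rw [if_pos rfl, if_neg (by omega : ¬ (minv + 1 = minv))] at h; omega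
    have bm1 : ((l.set i (maxv - 1)).set j (minv + 1)).count (minv + 1) = (l.set i (maxv - 1)).count (minv + 1) + 1 := by
      have h := eq2 (minv + 1); rw [if_neg (by omega : ¬ (minv = minv + 1)), if_pos rfl] at h; omega
    have bM : ((l.set i (maxv - 1)).set j (minv + 1)).count maxv = (l.set i (maxv - 1)).count maxv := by
      have h := eq2 maxv; rw [if_neg (by omega : ¬ (minv = maxv)), if_neg (by omega : ¬ (minv + 1 = maxv))] at h; omega
    have bM1 : ((l.set i (maxv - 1)).set j (minv + 1)).count (maxv - 1)
        = (l.set i (maxv - 1)).count (maxv - 1) + (if minv + 1 = maxv - 1 then 1 else 0) := by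
      have h := eq2 (maxv - 1); rw [if_neg (by omega : ¬ (minv = maxv - 1))] at h; omega
    -- the values A recomputes as new max / new min
    have maxA : PySem.List.max? (l.set i (maxv - 1)) (fun y => y)
        = some (if 1 < l.count maxv then maxv else maxv - 1) := by
      apply pv_max?_id_eq
      · by_cases h : 1 < l.count maxv
        · rw [if_pos h]; exact List.count_pos_iff.mp (by omega)
        · rw [if_neg h]; exact List.count_pos_iff.mp (by omega)
      · intro x hx
        have hx0 : 0 < (l.set i (maxv - 1)).count x := List.count_pos_iff.mpr hx
        by_cases hx1 : x = maxv - 1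
        · rw [hx1]; by_cases h : 1 < l.count maxv <;> simp [h]
        · have e := eq1 x
          rw [if_neg (show ¬ (maxv - 1 = x) from fun hh => hx1 hh.symm)] at e
          by_cases hx2 : x = maxv
          · rw [hx2] at e hx0 ⊢
            rw [if_pos rfl] at e
            have h : 1 < l.count maxv := by omega
            simp [h]
          · rw [if_neg (show ¬ (maxv = x) from fun hh => hx2 hh.symm)] at e
            have hxl : x ∈ l := List.count_pos_iff.mp (by omega)
            have hxle := hMmax x hxl
            by_cases h : 1 < l.count maxv <;> simp [h] <;> omega
    have minA : PySem.List.min? ((l.set i (maxv - 1)).set j (minv + 1)) (fun y => y)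
        = some (if 1 < l.count minv then minv else minv + 1) := by
      apply pv_min?_id_eq
      · by_cases h : 1 < l.count minv
        · rw [if_pos h]; exact List.count_pos_iff.mp (by omega)
        · rw [if_neg h]; exact List.count_pos_iff.mp (by omega)
      · intro x hx
        have hx0 : 0 < ((l.set i (maxv - 1)).set j (minv + 1)).count x := List.count_pos_iff.mpr hx
        by_cases hx1 : x = minv + 1
        · rw [hx1]; by_cases h : 1 < l.count minv <;> simp [h]
        · have e := eq2 x
          rw [if_neg (show ¬ (minv + 1 = x) from fun hh => hx1 hh.symm)] at e
          by_cases hx2 : x = minv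
          · rw [hx2] at e hx0 ⊢
            rw [if_pos rfl] at e
            have h : 1 < l.count minv := by omega
            simp [h]
          · rw [if_neg (show ¬ (minv = x) from fun hh => hx2 hh.symm)] at e
            have e' := eq1 x
            by_cases hx3 : x = maxv - 1
            · rw [hx3]
              by_cases h : 1 < l.count minv <;> simp [h] <;> omega
            · rw [if_neg (show ¬ (maxv - 1 = x) from fun hh => hx3 hh.symm)] at e'
              have hxl : x ∈ l := by
                apply List.count_pos_iff.mp
                by_cases hx4 : x = maxv
                · rw [hx4]; omega
                · rw [if_neg (show ¬ (maxv = x) from fun hh => hx4 hh.symm)] at e'; omega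
              have hxge := hmmin x hxl
              by_cases h : 1 < l.count minv <;> simp [h] <;> omega
    -- dict bookkeeping: the value of the counts dict after one body of Source B's loop
    have g0M : c.getD maxv 0 = (l.count maxv : Int) := by
      rw [PySem.Dict.getD_eq_get?_getD, hc maxv, pcount_getD]
    have g0m : c.getD minv 0 = (l.count minv : Int) := by
      rw [PySem.Dict.getD_eq_get?_getD, hc minv, pcount_getD]
    -- step dicts, matching the let-chain in solutionLoopB
    have hg2 : ∀ x : Int,
        (if (c.insert maxv (c.getD maxv 0 - 1)).getD maxv 0 == 0
          then (c.insert maxv (c.getD maxv 0 - 1)).erase maxv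
          else c.insert maxv (c.getD maxv 0 - 1)).get? x
        = if x = maxv then (if 1 < l.count maxv then some ((l.count maxv : Int) - 1) else none)
          else c.get? x := by
      intro x
      have t1 : (c.insert maxv (c.getD maxv 0 - 1)).getD maxv 0 = (l.count maxv : Int) - 1 := by
        rw [PySem.Dict.getD_eq_get?_getD, pv_get?_insert, if_pos rfl, Option.getD_some, g0M]
      by_cases hone : 1 < l.count maxv
      · have : ((c.insert maxv (c.getD maxv 0 - 1)).getD maxv 0 == 0) = false := by
          rw [t1]; simp; omega
        rw [this, if_neg (by simp)]
        rw [pv_get?_insert, g0M]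
        by_cases hx : x = maxv <;> simp [hx, hone]
      · have hcM1 : l.count maxv = 1 := by omega
        have : ((c.insert maxv (c.getD maxv 0 - 1)).getD maxv 0 == 0) = true := by
          rw [t1, hcM1]; simp
        rw [this, if_pos rfl, pv_get?_erase]
        by_cases hx : x = maxv
        · simp [hx, hone]
        · rw [if_neg hx, if_neg hx, pv_get?_insert, if_neg hx]
    -- unfold one loop iteration on both sides and name the intermediate dicts
    simp only [solutionLoopA, solutionLoopB]
    rw [if_pos (⟨hwc, hgap⟩ : wc ≠ 0 ∧ maxv - minv > 1),
        if_pos (⟨hwc, hgap⟩ : wc ≠ 0 ∧ maxv - minv > 1)]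
    rw [hi, hj]
    simp only [Option.getD_some]
    rw [maxA, minA]
    simp only [Option.getD_some]
    set d2 := if (c.insert maxv (c.getD maxv 0 - 1)).getD maxv 0 == 0
        then (c.insert maxv (c.getD maxv 0 - 1)).erase maxv
        else c.insert maxv (c.getD maxv 0 - 1) with hd2
    set d3 := d2.insert (maxv - 1) (d2.getD (maxv - 1) 0 + 1) with hd3
    set d4 := d3.insert minv (d3.getD minv 0 - 1) with hd4
    set d5 := if d4.getD minv 0 == 0 then d4.erase minv else d4 with hd5
    set d6 := d5.insert (minv + 1) (d5.getD (minv + 1) 0 + 1) with hd6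
    have g2M1 : d2.getD (maxv - 1) 0 = (l.count (maxv - 1) : Int) := by
      rw [PySem.Dict.getD_eq_get?_getD, hg2, if_neg (show ¬ ((maxv - 1 : Int) = maxv) by omega),
        hc, pcount_getD]
    have hg3 : ∀ x : Int, d3.get? x
        = if x = maxv - 1 then some ((l.count (maxv - 1) : Int) + 1) else d2.get? x := by
      intro x; rw [hd3, g2M1, pv_get?_insert]
    have g3m : d3.getD minv 0 = (l.count minv : Int) := by
      rw [PySem.Dict.getD_eq_get?_getD, hg3, if_neg (show ¬ (minv = maxv - 1) by omega),
        hg2, if_neg (show ¬ (minv = maxv) by omega), hc, pcount_getD]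
    have t4 : d4.getD minv 0 = (l.count minv : Int) - 1 := by
      rw [hd4, g3m, PySem.Dict.getD_eq_get?_getD, pv_get?_insert, if_pos rfl, Option.getD_some]
    have hg5 : ∀ x : Int, d5.get? x
        = if x = minv then (if 1 < l.count minv then some ((l.count minv : Int) - 1) else none)
          else d3.get? x := by
      intro x
      by_cases hone : 1 < l.count minv
      · have hfalse : (d4.getD minv 0 == 0) = false := by rw [t4]; simp; omega
        rw [hd5, hfalse]
        simp only [Bool.false_eq_true, if_false]
        rw [hd4, g3m, pv_get?_insert]
        by_cases hx : x = minv <;> simp [hx, hone]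
      · have htrue : (d4.getD minv 0 == 0) = true := by
          rw [t4]; simp; omega
        rw [hd5, htrue]
        simp only [if_true]
        rw [pv_get?_erase]
        by_cases hx : x = minv
        · simp [hx, hone]
        · rw [if_neg hx, if_neg hx, hd4, pv_get?_insert, if_neg hx]
    have g5m1 : d5.getD (minv + 1) 0 = ((l.set i (maxv - 1)).count (minv + 1) : Int) := by
      rw [PySem.Dict.getD_eq_get?_getD, hg5, if_neg (show ¬ ((minv + 1 : Int) = minv) by omega), hg3]
      by_cases hmm : (minv + 1 : Int) = maxv - 1
      · rw [if_pos hmm, Option.getD_some]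
        have ha := am1
        rw [if_pos hmm.symm] at ha
        rw [show (minv + 1 : Int) = maxv - 1 from hmm] at ha ⊢
        rw [ha]
        push_cast; ring
      · rw [if_neg hmm, hg2, if_neg (show ¬ ((minv + 1 : Int) = maxv) by omega), hc, pcount_getD]
        have ha := am1
        rw [if_neg (show ¬ (maxv - 1 = minv + 1) from fun h => hmm h.symm)] at ha
        rw [ha]
        push_cast; ring
    have hc6 : ∀ x : Int, d6.get? x = pcount ((l.set i (maxv - 1)).set j (minv + 1)) x := by
      intro x
      rw [hd6, g5m1, pv_get?_insert]
      by_cases hx1 : x = minv + 1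
      · rw [if_pos hx1, hx1]
        unfold pcount
        rw [if_pos (by omega : 0 < ((l.set i (maxv - 1)).set j (minv + 1)).count (minv + 1)), bm1]
        push_cast; ring_nf
      · rw [if_neg hx1, hg5]
        by_cases hx2 : x = minv
        · rw [if_pos hx2, hx2]
          by_cases hone : 1 < l.count minv
          · rw [if_pos hone]
            unfold pcount
            rw [if_pos (by omega : 0 < ((l.set i (maxv - 1)).set j (minv + 1)).count minv)]
            congr 1
            omega
          · rw [if_neg hone]
            unfold pcount
            rw [if_neg (by omega : ¬ 0 < ((l.set i (maxv - 1)).set j (minv + 1)).count minv)]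
        · rw [if_neg hx2, hg3]
          by_cases hx3 : x = maxv - 1
          · rw [if_pos hx3, hx3]
            have hmm : ¬ ((minv + 1 : Int) = maxv - 1) := fun h => hx1 (by rw [hx3, ← h])
            have hcnt : ((l.set i (maxv - 1)).set j (minv + 1)).count (maxv - 1)
                = l.count (maxv - 1) + 1 := by
              rw [bM1, if_neg hmm, aM1]
            unfold pcount
            rw [if_pos (by omega), hcnt]
            push_cast; ring_nf
          · rw [if_neg hx3, hg2]
            by_cases hx4 : x = maxv
            · rw [if_pos hx4, hx4]
              have hcnt : ((l.set i (maxv - 1)).set j (minv + 1)).count maxv + 1 = l.count maxv := by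
                rw [bM]; omega
              by_cases hone : 1 < l.count maxv
              · rw [if_pos hone]
                unfold pcount
                rw [if_pos (by omega)]
                congr 1
                omega
              · rw [if_neg hone]
                unfold pcount
                rw [if_neg (by omega)]
            · rw [if_neg hx4, hc]
              have h2 := eq2 x
              rw [if_neg (show ¬ (minv = x) from fun h => hx2 h.symm),
                if_neg (show ¬ (minv + 1 = x) from fun h => hx1 h.symm)] at h2
              have h1 := eq1 x
              rw [if_neg (show ¬ (maxv = x) from fun h => hx4 h.symm),
                if_neg (show ¬ (maxv - 1 = x) from fun h => hx3 h.symm)] at h1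
              unfold pcount
              rw [show ((l.set i (maxv - 1)).set j (minv + 1)).count x = l.count x by omega]
    -- the new hi / lo computed by Source B agree with A's recomputed max / min
    have hcontM : d6.contains maxv = decide (1 < l.count maxv) := by
      rw [PySem.Dict.contains_eq_isSome_get?, hc6 maxv]
      have hcnt : ((l.set i (maxv - 1)).set j (minv + 1)).count maxv + 1 = l.count maxv := by
        rw [bM]; omega
      unfold pcount
      by_cases hone : 1 < l.count maxv
      · rw [if_pos (by omega)]; simp [hone]
      · rw [if_neg (by omega)]; simp [hone]
    have hcontm : d6.contains minv = decide (1 < l.count minv) := by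
      rw [PySem.Dict.contains_eq_isSome_get?, hc6 minv]
      have hcnt : ((l.set i (maxv - 1)).set j (minv + 1)).count minv + 1 = l.count minv := by omega
      unfold pcount
      by_cases hone : 1 < l.count minv
      · rw [if_pos (by omega)]; simp [hone]
      · rw [if_neg (by omega)]; simp [hone]
    rw [hcontM, hcontm]
    simp only [decide_eq_true_eq]
    -- invariants for the next iteration
    have hM1mem : (if 1 < l.count maxv then maxv else maxv - 1)
        ∈ (l.set i (maxv - 1)).set j (minv + 1) := by
      by_cases hone : 1 < l.count maxv
      · rw [if_pos hone]; exact List.count_pos_iff.mp (by omega)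
      · rw [if_neg hone]
        apply List.count_pos_iff.mp
        have h5 : ((l.set i (maxv - 1)).set j (minv + 1)).count (maxv - 1)
            ≥ (l.set i (maxv - 1)).count (maxv - 1) := by
          rw [bM1]; split <;> omega
        omega
    have hM1bnd : ∀ x ∈ (l.set i (maxv - 1)).set j (minv + 1),
        x ≤ (if 1 < l.count maxv then maxv else maxv - 1) := by
      have hb1 := PySem.List.max?_isMax maxA
      intro x hx
      by_cases hx1 : x = minv + 1
      · rw [hx1]; by_cases hone : 1 < l.count maxv <;> simp [hone] <;> omega
      · have hx0 : 0 < ((l.set i (maxv - 1)).set j (minv + 1)).count x := List.count_pos_iff.mpr hx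
        have h2 := eq2 x
        rw [if_neg (show ¬ (minv + 1 = x) from fun h => hx1 h.symm)] at h2
        exact hb1 x (List.count_pos_iff.mp (by omega))
    have hm1mem := PySem.List.min?_mem minA
    have hm1bnd : ∀ x ∈ (l.set i (maxv - 1)).set j (minv + 1),
        (if 1 < l.count minv then minv else minv + 1) ≤ x :=
      fun x hx => PySem.List.min?_isMin minA x hx
    exact ih _ d6 (wc - 1) _ _ hc6 hM1mem hM1bnd hm1mem hm1bnd

-- ===== VERDICT (by name: the statement is the Claim_ definition above) =====
theorem solution_spec : Claim_equal_solution := by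
  intro tc l wc _hdom hpre
  unfold Spec_solution solution solution_alt
  have hctr : l.foldl (fun d a => d.insert a (d.getD a 0 + 1)) PySem.Dict.empty
      = PySem.Dict.counter l := by
    rw [PySem.Dict.counter_eq_foldl]; rfl
  obtain ⟨maxv, hmax⟩ : ∃ m, PySem.List.max? l (fun y => y) = some m := by
    cases h : PySem.List.max? l (fun y => y) with
    | none => exact absurd ((PySem.List.max?_eq_none_iff _ _).mp h) hpre
    | some m => exact ⟨m, rfl⟩
  obtain ⟨minv, hmin⟩ : ∃ m, PySem.List.min? l (fun y => y) = some m := by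
    cases h : PySem.List.min? l (fun y => y) with
    | none => exact absurd ((PySem.List.min?_eq_none_iff _ _).mp h) hpre
    | some m => exact ⟨m, rfl⟩
  simp only [hctr, hmax, hmin]
  have hfuel : pvFuelB l = pvFuelA l := rfl
  rw [hfuel]
  have hloop := pv_loop_eq (pvFuelA l) l (PySem.Dict.counter l) wc maxv minv
    (pv_get?_counter l) (PySem.List.max?_mem hmax) (PySem.List.max?_isMax hmax)
    (PySem.List.min?_mem hmin) (PySem.List.min?_isMin hmin)
  rw [hloop]
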